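-- pv_equiv track=rewrite | github.com/Amar5623/amazon_tech_analytics | scraper/preprocessing.py | _structure_product_specs
-- ===== SOURCE A (Python) =====
-- from typing import Dict, List, Any
--
-- def _structure_product_specs(specs: Dict[str, str]) -> Dict[str, Any]:
--     """Helper function to organize specs into meaningful categories"""
--     structured = {
--         'general': {},
--         'processor': {},
--         'memory': {},
--         'display': {},
--         'storage': {},
--         'graphics': {},
--         'physical': {},
--         'connectivity': {},
--         'other': {}
--     }
--
--     # Map specs to categories based on keywords
--     for spec_name, value in specs.items():
--         if any(x in spec_name for x in ['processor', 'cpu', 'core']):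
--             structured['processor'][spec_name] = value
--         elif any(x in spec_name for x in ['memory', 'ram']):
--             structured['memory'][spec_name] = value
--         elif any(x in spec_name for x in ['display', 'screen', 'resolution']):
--             structured['display'][spec_name] = value
--         elif any(x in spec_name for x in ['storage', 'ssd', 'hdd', 'drive']):
--             structured['storage'][spec_name] = value
--         elif any(x in spec_name for x in ['graphics', 'gpu', 'video']):
--             structured['graphics'][spec_name] = value
--         elif any(x in spec_name for x in ['weight', 'dimension', 'size']):
--             structured['physical'][spec_name] = value
--         elif any(x in spec_name for x in ['wifi', 'bluetooth', 'usb', 'port']):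
--             structured['connectivity'][spec_name] = value
--         elif any(x in spec_name for x in ['brand', 'manufacturer', 'model', 'series']):
--             structured['general'][spec_name] = value
--         else:
--             structured['other'][spec_name] = value
--
--     # Remove empty categories
--     return {k: v for k, v in structured.items() if v}
-- ===== SOURCE B (Python) =====
-- CATEGORIES = [
--     ('processor', ['processor', 'cpu', 'core']),
--     ('memory', ['memory', 'ram']),
--     ('display', ['display', 'screen', 'resolution']),
--     ('storage', ['storage', 'ssd', 'hdd', 'drive']),
--     ('graphics', ['graphics', 'gpu', 'video']),
--     ('physical', ['weight', 'dimension', 'size']),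
--     ('connectivity', ['wifi', 'bluetooth', 'usb', 'port']),
--     ('general', ['brand', 'manufacturer', 'model', 'series']),
-- ]
--
-- OUTPUT_ORDER = ['general', 'processor', 'memory', 'display', 'storage',
--                 'graphics', 'physical', 'connectivity', 'other']
--
--
-- def _classify(name):
--     for cat, kws in CATEGORIES:
--         if any(k in name for k in kws):
--             return cat
--     return 'other'
--
--
-- def _structure_product_specs(specs):
--     """Staged version: one filtering pass per output category instead of a
--     single bucketing pass; each category's group is a dict comprehension."""
--     result = {}
--     for cat in OUTPUT_ORDER:
--         group = {k: v for k, v in specs.items() if _classify(k) == cat}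
--         if group:
--             result[cat] = group
--     return result
-- ===== Notes on version B (the rewrite author's own statement) =====
-- stated objective: alternative
-- what changed: Inverts the loop structure: instead of A's single pass over the specs with a nine-way if/elif dispatch into a pre-seeded accumulator followed by an empty-filter, B makes one independent filtering pass per output category (a dict comprehension selecting the specs classified to that category) and appends each non-empty group directly in output order.
import Mathlib
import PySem

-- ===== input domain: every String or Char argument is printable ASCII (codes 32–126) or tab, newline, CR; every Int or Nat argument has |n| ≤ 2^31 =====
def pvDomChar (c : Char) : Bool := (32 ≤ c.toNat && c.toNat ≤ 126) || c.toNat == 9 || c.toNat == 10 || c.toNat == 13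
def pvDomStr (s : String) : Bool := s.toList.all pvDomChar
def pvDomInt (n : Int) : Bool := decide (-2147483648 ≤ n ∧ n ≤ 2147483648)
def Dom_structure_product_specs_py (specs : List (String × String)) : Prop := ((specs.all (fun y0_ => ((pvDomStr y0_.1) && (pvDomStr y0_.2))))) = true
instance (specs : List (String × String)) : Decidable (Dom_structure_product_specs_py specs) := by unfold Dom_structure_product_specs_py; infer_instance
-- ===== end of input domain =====

-- B inverts the loop structure: one filtering pass (dict comprehension) per output
-- category in output order, instead of A's single bucketing pass with an if/elif
-- dispatch into a pre-seeded dict followed by an empty-filter (objective: alternative).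

-- ===== PORT A =====
-- the pre-seeded 'structured' dict of A, all nine categories mapped to {}
def pvSeedA : PySem.Dict String (PySem.Dict String String) :=
  ⟨[("general", PySem.Dict.empty), ("processor", PySem.Dict.empty), ("memory", PySem.Dict.empty),
    ("display", PySem.Dict.empty), ("storage", PySem.Dict.empty), ("graphics", PySem.Dict.empty),
    ("physical", PySem.Dict.empty), ("connectivity", PySem.Dict.empty), ("other", PySem.Dict.empty)]⟩

-- the body of A's for-loop: the if/elif chain, `structured[cat][name] = value` as modify-insert
def pvStepA (st : PySem.Dict String (PySem.Dict String String)) (p : String × String) :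
    PySem.Dict String (PySem.Dict String String) :=
  if ["processor", "cpu", "core"].any (fun k => PySem.Str.isIn k p.1) then
    st.modify "processor" PySem.Dict.empty (fun d => d.insert p.1 p.2)
  else if ["memory", "ram"].any (fun k => PySem.Str.isIn k p.1) then
    st.modify "memory" PySem.Dict.empty (fun d => d.insert p.1 p.2)
  else if ["display", "screen", "resolution"].any (fun k => PySem.Str.isIn k p.1) then
    st.modify "display" PySem.Dict.empty (fun d => d.insert p.1 p.2)
  else if ["storage", "ssd", "hdd", "drive"].any (fun k => PySem.Str.isIn k p.1) then
    st.modify "storage" PySem.Dict.empty (fun d => d.insert p.1 p.2)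
  else if ["graphics", "gpu", "video"].any (fun k => PySem.Str.isIn k p.1) then
    st.modify "graphics" PySem.Dict.empty (fun d => d.insert p.1 p.2)
  else if ["weight", "dimension", "size"].any (fun k => PySem.Str.isIn k p.1) then
    st.modify "physical" PySem.Dict.empty (fun d => d.insert p.1 p.2)
  else if ["wifi", "bluetooth", "usb", "port"].any (fun k => PySem.Str.isIn k p.1) then
    st.modify "connectivity" PySem.Dict.empty (fun d => d.insert p.1 p.2)
  else if ["brand", "manufacturer", "model", "series"].any (fun k => PySem.Str.isIn k p.1) then
    st.modify "general" PySem.Dict.empty (fun d => d.insert p.1 p.2)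
  else
    st.modify "other" PySem.Dict.empty (fun d => d.insert p.1 p.2)

def structure_product_specs_py (specs : List (String × String)) : List (String × List (String × String)) :=
  let structured := specs.foldl pvStepA pvSeedA
  -- {k: v for k, v in structured.items() if v}
  (structured.items.filter (fun kv => !kv.2.items.isEmpty)).map (fun kv => (kv.1, kv.2.items))

-- ===== PORT B =====
def pvCategories : List (String × List String) :=
  [("processor", ["processor", "cpu", "core"]),
   ("memory", ["memory", "ram"]),
   ("display", ["display", "screen", "resolution"]),
   ("storage", ["storage", "ssd", "hdd", "drive"]),
   ("graphics", ["graphics", "gpu", "video"]),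
   ("physical", ["weight", "dimension", "size"]),
   ("connectivity", ["wifi", "bluetooth", "usb", "port"]),
   ("general", ["brand", "manufacturer", "model", "series"])]

def pvOrder : List String :=
  ["general", "processor", "memory", "display", "storage", "graphics", "physical", "connectivity", "other"]

-- _classify: first table row whose any keyword is a substring, else 'other'
def pvClassify (name : String) : String :=
  ((pvCategories.find? (fun ck => ck.2.any (fun k => PySem.Str.isIn k name))).map (fun ck => ck.1)).getD "other"

-- the per-category dict comprehension {k: v for k, v in specs.items() if _classify(k) == cat}
def pvGroup (c : String) (specs : List (String × String)) : PySem.Dict String String :=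
  specs.foldl (fun d p => if pvClassify p.1 = c then d.insert p.1 p.2 else d) PySem.Dict.empty

def structure_product_specs_py_alt (specs : List (String × String)) : List (String × List (String × String)) :=
  -- for cat in OUTPUT_ORDER: group = {…}; if group: result[cat] = group
  pvOrder.filterMap (fun c =>
    let g := pvGroup c specs
    if g.items.isEmpty then none else some (c, g.items))

-- ===== PRECONDITION & SPEC =====
def Spec_structure_product_specs_py (specs : List (String × String)) (out : List (String × List (String × String))) : Prop := out = structure_product_specs_py_alt specs
instance (specs : List (String × String)) (out : List (String × List (String × String))) : Decidable (Spec_structure_product_specs_py specs out) := by unfold Spec_structure_product_specs_py; infer_instance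

-- ===== CLAIM (what is proved, stated in full; the proofs are below) =====
def Claim_equal_structure_product_specs_py : Prop := ∀ (specs : List (String × String)), Dom_structure_product_specs_py specs → Spec_structure_product_specs_py specs (structure_product_specs_py specs)

-- ===== LEMMAS AND PROOFS =====

theorem pvClassify_mem (s : String) : pvClassify s ∈ pvOrder := by
  unfold pvClassify
  rcases h : pvCategories.find? (fun ck => ck.2.any (fun k => PySem.Str.isIn k s)) with _ | ck
  · rw [h]; simp [pvOrder]
  · rw [h]
    have hm := List.mem_of_find?_eq_some h
    simp only [pvCategories, List.mem_cons, List.not_mem_nil, or_false] at hm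
    rcases hm with rfl | rfl | rfl | rfl | rfl | rfl | rfl | rfl <;> simp [pvOrder]

theorem pvStepA_eq (st : PySem.Dict String (PySem.Dict String String)) (p : String × String) :
    pvStepA st p = st.modify (pvClassify p.1) PySem.Dict.empty (fun d => d.insert p.1 p.2) := by
  unfold pvStepA pvClassify pvCategories
  simp only [List.find?]
  rcases h1 : ["processor", "cpu", "core"].any (fun k => PySem.Str.isIn k p.1) with _ | _ <;>
  rcases h2 : ["memory", "ram"].any (fun k => PySem.Str.isIn k p.1) with _ | _ <;>
  rcases h3 : ["display", "screen", "resolution"].any (fun k => PySem.Str.isIn k p.1) with _ | _ <;>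
  rcases h4 : ["storage", "ssd", "hdd", "drive"].any (fun k => PySem.Str.isIn k p.1) with _ | _ <;>
  rcases h5 : ["graphics", "gpu", "video"].any (fun k => PySem.Str.isIn k p.1) with _ | _ <;>
  rcases h6 : ["weight", "dimension", "size"].any (fun k => PySem.Str.isIn k p.1) with _ | _ <;>
  rcases h7 : ["wifi", "bluetooth", "usb", "port"].any (fun k => PySem.Str.isIn k p.1) with _ | _ <;>
  rcases h8 : ["brand", "manufacturer", "model", "series"].any (fun k => PySem.Str.isIn k p.1) with _ | _ <;>
  simp only [h1, h2, h3, h4, h5, h6, h7, h8, if_true, if_false, Option.map_some, Option.getD_some,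
    Bool.false_eq_true, Bool.true_eq_false, Option.map_none, Option.getD_none]

theorem pvKeysA (l : List (String × String)) (st : PySem.Dict String (PySem.Dict String String))
    (h : st.keys = pvOrder) : (l.foldl pvStepA st).keys = pvOrder := by
  induction l generalizing st with
  | nil => exact h
  | cons p l ih =>
      apply ih
      rw [pvStepA_eq, PySem.Dict.keys_modify, PySem.Dict.keys_insert_of_contains]
      · exact h
      · rw [PySem.Dict.contains_eq_decide_mem_keys, h]
        simp [pvClassify_mem]

theorem pvGetDA (l : List (String × String)) (st : PySem.Dict String (PySem.Dict String String)) (c : String) :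
    (l.foldl pvStepA st).getD c PySem.Dict.empty =
      l.foldl (fun d p => if pvClassify p.1 = c then d.insert p.1 p.2 else d) (st.getD c PySem.Dict.empty) := by
  induction l generalizing st with
  | nil => rfl
  | cons p l ih =>
      rw [List.foldl_cons, ih]
      have : (pvStepA st p).getD c PySem.Dict.empty =
          (if pvClassify p.1 = c then (st.getD c PySem.Dict.empty).insert p.1 p.2
           else st.getD c PySem.Dict.empty) := by
        rw [pvStepA_eq, PySem.Dict.getD_modify]
        by_cases hc : pvClassify p.1 = c
        · rw [if_pos hc, if_pos hc.symm, hc]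
        · rw [if_neg hc, if_neg (fun h => hc h.symm)]
      rw [this]
      by_cases hc : pvClassify p.1 = c <;> simp [hc]

-- assembling: A's filter-then-map over the ordered items list equals B's filterMap per category
theorem pvAssemble (specs : List (String × String)) : ∀ ks : List String,
    ((ks.map (fun c => (c, pvGroup c specs))).filter
        (fun kv => !kv.2.items.isEmpty)).map (fun kv => (kv.1, kv.2.items))
      = ks.filterMap (fun c =>
          let g := pvGroup c specs
          if g.items.isEmpty then none else some (c, g.items)) := by
  intro ks
  induction ks with
  | nil => rfl
  | cons c ks ih =>
      by_cases h : (pvGroup c specs).items = []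
      · simp [List.isEmpty_iff, h, ih]
      · simp [List.isEmpty_iff, h, ih]

-- ===== VERDICT (by name: the statement is the Claim_ definition above) =====
theorem structure_product_specs_py_spec : Claim_equal_structure_product_specs_py := by
  intro specs _
  unfold Spec_structure_product_specs_py structure_product_specs_py structure_product_specs_py_alt
  have hk : (specs.foldl pvStepA pvSeedA).keys = pvOrder := pvKeysA specs pvSeedA rfl
  have hnd : (specs.foldl pvStepA pvSeedA).keys.Nodup := by rw [hk]; decide
  have hitems : (specs.foldl pvStepA pvSeedA).items
      = pvOrder.map (fun c => (c, pvGroup c specs)) := by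
    rw [PySem.Dict.items_eq_map_keys _ hnd PySem.Dict.empty, hk]
    apply List.map_congr_left
    intro c hc
    rw [pvGetDA]
    have hseed : pvSeedA.getD c PySem.Dict.empty = PySem.Dict.empty := by
      fin_cases hc <;> rfl
    rw [hseed]; rfl
  simp only [hitems]
  exact pvAssemble specs pvOrder
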